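-- pv_equiv track=rewrite | github.com/sushrutb/todoapp | wiki/views.py | add_links
-- ===== SOURCE A (Python) =====
-- def add_links(tag_data):
--     new_tag_data = []
--     curr_link = ''
--     links = []
--     for tag_ in tag_data:
--         tuple_data = [tag_]
--         if tag_ == 'ul':
--             links.append(curr_link)
--             new_tag_data.append(tuple_data)
--         elif tag_ == '/ul':
--             links = links[:len(links)-1]
--             new_tag_data.append(tuple_data)
--         elif tag_ == 'li':
--             new_tag_data.append(tuple_data)
--         elif tag_ == '/li':
--             new_tag_data.append(tuple_data)
--         else:
--             curr_link = tag_.replace('#','')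
--             if len(links) > 0:
--                 link_str = ''
--                 for link_ in links:
--                     link_str += '&tag=' + link_
--                 tuple_data.append(link_str+'&tag='+curr_link)
--             else:
--                 tuple_data.append('&tag='+curr_link)
--             new_tag_data.append(tuple_data)
--
--     return new_tag_data
-- ===== SOURCE B (Python) =====
-- def add_links(tag_data):
--     # Maintains the accumulated link query string incrementally with a stack of
--     # saved prefixes, instead of rebuilding it from a list on every tag.
--     out = []
--     curr = ''
--     prefix = ''
--     stack = []
--     for tag in tag_data:
--         if tag == 'ul':
--             stack.append(prefix)
--             prefix = prefix + '&tag=' + curr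
--             out.append([tag])
--         elif tag == '/ul':
--             if stack:
--                 prefix = stack.pop()
--             out.append([tag])
--         elif tag == 'li' or tag == '/li':
--             out.append([tag])
--         else:
--             curr = tag.replace('#', '')
--             out.append([tag, prefix + '&tag=' + curr])
--     return out
-- ===== Notes on version B (the rewrite author's own statement) =====
-- stated objective: alternative
-- what changed: Instead of keeping a list of open tag names and rebuilding the '&tag=...' query string with an inner loop for every non-structural token, B maintains the accumulated query string incrementally, pushing the previous string on a stack at 'ul' and popping it at '/ul', a different algorithm over a different state (no list of open tags, no inner loop).
import Mathlib
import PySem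

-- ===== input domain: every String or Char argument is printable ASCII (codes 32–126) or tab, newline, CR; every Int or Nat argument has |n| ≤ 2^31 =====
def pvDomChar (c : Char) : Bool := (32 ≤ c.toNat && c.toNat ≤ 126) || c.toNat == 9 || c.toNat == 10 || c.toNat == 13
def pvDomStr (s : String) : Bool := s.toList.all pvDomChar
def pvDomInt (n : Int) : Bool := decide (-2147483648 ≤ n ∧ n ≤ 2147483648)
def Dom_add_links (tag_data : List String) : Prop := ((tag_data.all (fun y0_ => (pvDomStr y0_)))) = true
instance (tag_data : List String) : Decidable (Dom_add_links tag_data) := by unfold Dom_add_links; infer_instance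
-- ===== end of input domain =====

-- B replaces A's per-tag rebuild of the link string (inner loop over the open-tag list)
-- by an incrementally maintained prefix string with a stack of saved prefixes (alternative algorithm).


-- ===== PORT A =====
-- state: (new_tag_data, curr_link, links)
def add_links_stepA (st : List (List String) × String × List String) (tag_ : String) :
    List (List String) × String × List String :=
  let (new_tag_data, curr_link, links) := st
  if tag_ = "ul" then
    (new_tag_data ++ [[tag_]], curr_link, links ++ [curr_link])
  else if tag_ = "/ul" then
    -- links = links[:len(links)-1]
    (new_tag_data ++ [[tag_]], curr_link,
      PySem.List.slice links (some 0) (some ((links.length : Int) - 1)))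
  else if tag_ = "li" then
    (new_tag_data ++ [[tag_]], curr_link, links)
  else if tag_ = "/li" then
    (new_tag_data ++ [[tag_]], curr_link, links)
  else
    let curr_link' := PySem.Str.replace tag_ "#" ""
    let row :=
      if links.length > 0 then
        -- link_str built by the inner loop over links
        let link_str := links.foldl (fun s link_ => s ++ "&tag=" ++ link_) ""
        [tag_, link_str ++ "&tag=" ++ curr_link']
      else
        [tag_, "&tag=" ++ curr_link']
    (new_tag_data ++ [row], curr_link', links)

def add_links (tag_data : List String) : List (List String) :=
  (tag_data.foldl add_links_stepA ([], "", [])).1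

-- ===== PORT B =====
-- state: (out, curr, prefix, stack) — stack of saved prefixes, top at head
def add_links_stepB (st : List (List String) × String × String × List String) (tag : String) :
    List (List String) × String × String × List String :=
  let (out, curr, pfx, stack) := st
  if tag = "ul" then
    (out ++ [[tag]], curr, pfx ++ "&tag=" ++ curr, pfx :: stack)
  else if tag = "/ul" then
    match stack with
    | [] => (out ++ [[tag]], curr, pfx, [])
    | p :: rest => (out ++ [[tag]], curr, p, rest)
  else if tag = "li" ∨ tag = "/li" then
    (out ++ [[tag]], curr, pfx, stack)
  else
    let c := PySem.Str.replace tag "#" ""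
    (out ++ [[tag, pfx ++ "&tag=" ++ c]], c, pfx, stack)

def add_links_alt (tag_data : List String) : List (List String) :=
  (tag_data.foldl add_links_stepB ([], "", "", [])).1

-- ===== PRECONDITION & SPEC =====
def Spec_add_links (tag_data : List String) (out : List (List String)) : Prop := out = add_links_alt tag_data
instance (tag_data : List String) (out : List (List String)) : Decidable (Spec_add_links tag_data out) := by unfold Spec_add_links; infer_instance

-- ===== CLAIM (what is proved, stated in full; the proofs are below) =====
def Claim_equal_add_links : Prop := ∀ (tag_data : List String), Dom_add_links tag_data → Spec_add_links tag_data (add_links tag_data)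

-- ===== LEMMAS AND PROOFS =====

-- the link string A's inner loop computes from the open-tag list
def linkStr (links : List String) : String :=
  links.foldl (fun s link_ => s ++ "&tag=" ++ link_) ""

-- the stack of saved prefixes B holds when A holds `links`
def linkStack (links : List String) : List String :=
  (List.range links.length).reverse.map (fun i => linkStr (links.take i))

theorem linkStr_append (l : List String) (c : String) :
    linkStr (l ++ [c]) = linkStr l ++ "&tag=" ++ c := by
  simp [linkStr, List.foldl_append]

theorem linkStack_append (l : List String) (c : String) :
    linkStack (l ++ [c]) = linkStr l :: linkStack l := by
  unfold linkStack
  rw [List.length_append, List.length_singleton, List.range_succ, List.reverse_append]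
  simp only [List.reverse_singleton, List.singleton_append, List.map_cons, List.take_left]
  congr 1
  apply List.map_congr_left
  intro i hi
  rw [List.mem_reverse, List.mem_range] at hi
  rw [List.take_append_of_le_length (Nat.le_of_lt hi)]

theorem linkStack_pop (l : List String) (h : l ≠ []) :
    linkStack l = linkStr l.dropLast :: linkStack l.dropLast := by
  conv_lhs => rw [← List.dropLast_append_getLast h]
  exact linkStack_append l.dropLast (l.getLast h)

theorem slice_dropLast (l : List String) :
    PySem.List.slice l none (some ((l.length : Int) - 1)) = l.dropLast := by
  cases l with
  | nil => simp [PySem.List.slice]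
  | cons x xs =>
    have h : ((x :: xs).length : Int) - 1 = ((xs.length : Nat) : Int) := by
      simp
    rw [h, PySem.List.slice_to_natCast, List.dropLast_eq_take]
    simp

theorem fold_inv (ts : List String) : ∀ (out : List (List String)) (curr : String) (links : List String),
    ts.foldl add_links_stepB (out, curr, linkStr links, linkStack links) =
      (fun st : List (List String) × String × List String =>
        (st.1, st.2.1, linkStr st.2.2, linkStack st.2.2))
        (ts.foldl add_links_stepA (out, curr, links)) := by
  induction ts with
  | nil => intro out curr links; rfl
  | cons t ts ih =>
    intro out curr links
    simp only [List.foldl_cons]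
    by_cases h1 : t = "ul"
    · rw [show add_links_stepB (out, curr, linkStr links, linkStack links) t
            = (out ++ [[t]], curr, linkStr links ++ "&tag=" ++ curr, linkStr links :: linkStack links) by
          simp [add_links_stepB, h1]]
      rw [show add_links_stepA (out, curr, links) t = (out ++ [[t]], curr, links ++ [curr]) by
          simp [add_links_stepA, h1]]
      rw [← linkStr_append, ← linkStack_append]
      exact ih (out ++ [[t]]) curr (links ++ [curr])
    · by_cases h2 : t = "/ul"
      · rcases eq_or_ne links [] with hl | hl
        · subst hl
          rw [show add_links_stepB (out, curr, linkStr [], linkStack []) t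
                = (out ++ [[t]], curr, linkStr [], linkStack []) by
              simp [add_links_stepB, h2, linkStack]]
          rw [show add_links_stepA (out, curr, ([] : List String)) t
                = (out ++ [[t]], curr, ([] : List String)) by
              simp [add_links_stepA, h2, PySem.List.slice]]
          exact ih (out ++ [[t]]) curr []
        · rw [show add_links_stepB (out, curr, linkStr links, linkStack links) t
                = (out ++ [[t]], curr, linkStr links.dropLast, linkStack links.dropLast) by
              simp only [add_links_stepB]
              rw [linkStack_pop links hl]
              simp [h2]]
          rw [show add_links_stepA (out, curr, links) t = (out ++ [[t]], curr, links.dropLast) by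
              simp [add_links_stepA, h2, slice_dropLast]]
          exact ih (out ++ [[t]]) curr links.dropLast
      · by_cases h3 : t = "li"
        · rw [show add_links_stepB (out, curr, linkStr links, linkStack links) t
                = (out ++ [[t]], curr, linkStr links, linkStack links) by
              simp [add_links_stepB, h3]]
          rw [show add_links_stepA (out, curr, links) t = (out ++ [[t]], curr, links) by
              simp [add_links_stepA, h3]]
          exact ih (out ++ [[t]]) curr links
        · by_cases h4 : t = "/li"
          · rw [show add_links_stepB (out, curr, linkStr links, linkStack links) t
                  = (out ++ [[t]], curr, linkStr links, linkStack links) by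
                simp [add_links_stepB, h4]]
            rw [show add_links_stepA (out, curr, links) t = (out ++ [[t]], curr, links) by
                simp [add_links_stepA, h4]]
            exact ih (out ++ [[t]]) curr links
          · -- name tag: rows agree (A splits on links = [], B does not need to)
            have hrow : (if links.length > 0 then
                  [t, (links.foldl (fun s link_ => s ++ "&tag=" ++ link_) "") ++ "&tag="
                      ++ PySem.Str.replace t "#" ""]
                else [t, "&tag=" ++ PySem.Str.replace t "#" ""])
                = [t, linkStr links ++ "&tag=" ++ PySem.Str.replace t "#" ""] := by
              rcases eq_or_ne links [] with hl | hl
              · subst hl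
                simp [linkStr, String.empty_append]
              · rw [if_pos (List.length_pos_iff.mpr hl)]
                rfl
            rw [show add_links_stepB (out, curr, linkStr links, linkStack links) t
                  = (out ++ [[t, linkStr links ++ "&tag=" ++ PySem.Str.replace t "#" ""]],
                     PySem.Str.replace t "#" "", linkStr links, linkStack links) by
                simp [add_links_stepB, h1, h2, h3, h4]]
            rw [show add_links_stepA (out, curr, links) t
                  = (out ++ [[t, linkStr links ++ "&tag=" ++ PySem.Str.replace t "#" ""]],
                     PySem.Str.replace t "#" "", links) by
                simp only [add_links_stepA]
                rw [if_neg h1, if_neg h2, if_neg h3, if_neg h4, ← hrow]]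
            exact ih _ _ links

-- ===== VERDICT (by name: the statement is the Claim_ definition above) =====
theorem add_links_spec : Claim_equal_add_links := by
  intro tag_data _
  unfold Spec_add_links add_links add_links_alt
  have h := fold_inv tag_data [] "" []
  have h0 : linkStr [] = "" := rfl
  have h1 : linkStack [] = [] := rfl
  rw [h0, h1] at h
  rw [h]
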